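-- pv_equiv track=rewrite | github.com/gptdlnk/rcaiagent | RebirthRC_AI_PT/mcp/role_engine.py | _analyze_current_situation
-- ===== SOURCE A (Python) =====
-- from typing import Any, Dict, List, Optional, Union
--
-- def _analyze_current_situation(observations: List[str],
--                                vulnerabilities: List[Dict[str, Any]],
--                                state: str) -> str:
--     """วิเคราะห์สถานการณ์ปัจจุบันแบบเรียลไทม์"""
--     # Highest priority: Social engineering opportunity
--     if any("DISCORD_CHANNEL_ACTIVE" in obs or "SOCIAL_ENGINEERING_OPPORTUNITY" in obs for obs in observations):
--         return "SOCIAL_ENGINEERING_OPPORTUNITY"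
--
--     # Check for verification needs
--     if any("VERIFICATION_NEEDED" in obs or "VULN_DETECTED" in obs for obs in observations):
--         return "VERIFICATION_NEEDED"
--
--     # Check for confirmed vulnerabilities
--     if vulnerabilities:
--         return "VULNERABILITY_DETECTED"
--
--     # Check for protocol knowledge
--     if any("RE_KNOWLEDGE" in obs for obs in observations):
--         return "PROTOCOL_DISCOVERED"
--
--     # Check for network activity
--     if any("NETWORK_SUMMARY" in obs for obs in observations):
--         return "NETWORK_ANALYSIS"
--
--     # Default
--     return "INITIAL_RECON"
-- ===== SOURCE B (Python) =====
-- def _analyze_current_situation(observations, vulnerabilities, state):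
--     social = verification = protocol = network = False
--     for obs in observations:
--         if "DISCORD_CHANNEL_ACTIVE" in obs or "SOCIAL_ENGINEERING_OPPORTUNITY" in obs:
--             social = True
--         if "VERIFICATION_NEEDED" in obs or "VULN_DETECTED" in obs:
--             verification = True
--         if "RE_KNOWLEDGE" in obs:
--             protocol = True
--         if "NETWORK_SUMMARY" in obs:
--             network = True
--     if social:
--         return "SOCIAL_ENGINEERING_OPPORTUNITY"
--     if verification:
--         return "VERIFICATION_NEEDED"
--     if vulnerabilities:
--         return "VULNERABILITY_DETECTED"
--     if protocol:
--         return "PROTOCOL_DISCOVERED"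
--     if network:
--         return "NETWORK_ANALYSIS"
--     return "INITIAL_RECON"
-- ===== Notes on version B (the rewrite author's own statement) =====
-- stated objective: alternative
-- what changed: Replaces four separate any()-scans over observations by a single pass collecting four boolean flags, followed by a separate priority decision step.
import Mathlib
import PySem

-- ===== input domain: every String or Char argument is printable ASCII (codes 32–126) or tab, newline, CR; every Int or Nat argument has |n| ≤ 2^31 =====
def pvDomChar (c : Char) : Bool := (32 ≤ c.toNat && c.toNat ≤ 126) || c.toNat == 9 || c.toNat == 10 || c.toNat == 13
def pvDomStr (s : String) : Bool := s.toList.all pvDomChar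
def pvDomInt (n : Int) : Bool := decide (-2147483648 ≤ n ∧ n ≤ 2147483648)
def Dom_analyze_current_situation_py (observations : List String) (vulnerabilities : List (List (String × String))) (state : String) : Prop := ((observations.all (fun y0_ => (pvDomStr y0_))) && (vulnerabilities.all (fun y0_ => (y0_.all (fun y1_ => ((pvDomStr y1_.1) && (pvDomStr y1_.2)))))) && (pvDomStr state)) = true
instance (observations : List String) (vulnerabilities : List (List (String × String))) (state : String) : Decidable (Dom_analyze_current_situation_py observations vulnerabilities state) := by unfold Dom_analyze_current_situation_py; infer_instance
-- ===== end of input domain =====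

-- B replaces four separate any()-scans over observations with one flag-collecting pass
-- plus a separate decision step (alternative decomposition, same cost).

-- ===== PORT A =====
def analyze_current_situation_py (observations : List String) (vulnerabilities : List (List (String × String))) (state : String) : String :=
  if observations.any (fun obs => PySem.Str.isIn "DISCORD_CHANNEL_ACTIVE" obs || PySem.Str.isIn "SOCIAL_ENGINEERING_OPPORTUNITY" obs) then "SOCIAL_ENGINEERING_OPPORTUNITY"
  else if observations.any (fun obs => PySem.Str.isIn "VERIFICATION_NEEDED" obs || PySem.Str.isIn "VULN_DETECTED" obs) then "VERIFICATION_NEEDED"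
  else if !vulnerabilities.isEmpty then "VULNERABILITY_DETECTED"
  else if observations.any (fun obs => PySem.Str.isIn "RE_KNOWLEDGE" obs) then "PROTOCOL_DISCOVERED"
  else if observations.any (fun obs => PySem.Str.isIn "NETWORK_SUMMARY" obs) then "NETWORK_ANALYSIS"
  else "INITIAL_RECON"

-- ===== PORT B =====
-- one pass collecting (social, verification, protocol, network) flags
def pvStep (f : Bool × Bool × Bool × Bool) (obs : String) : Bool × Bool × Bool × Bool :=
  ( (if PySem.Str.isIn "DISCORD_CHANNEL_ACTIVE" obs || PySem.Str.isIn "SOCIAL_ENGINEERING_OPPORTUNITY" obs then true else f.1),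
    (if PySem.Str.isIn "VERIFICATION_NEEDED" obs || PySem.Str.isIn "VULN_DETECTED" obs then true else f.2.1),
    (if PySem.Str.isIn "RE_KNOWLEDGE" obs then true else f.2.2.1),
    (if PySem.Str.isIn "NETWORK_SUMMARY" obs then true else f.2.2.2) )

def analyze_current_situation_py_alt (observations : List String) (vulnerabilities : List (List (String × String))) (state : String) : String :=
  let flags := observations.foldl pvStep (false, false, false, false)
  if flags.1 then "SOCIAL_ENGINEERING_OPPORTUNITY"
  else if flags.2.1 then "VERIFICATION_NEEDED"
  else if !vulnerabilities.isEmpty then "VULNERABILITY_DETECTED"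
  else if flags.2.2.1 then "PROTOCOL_DISCOVERED"
  else if flags.2.2.2 then "NETWORK_ANALYSIS"
  else "INITIAL_RECON"

-- ===== PRECONDITION & SPEC =====
def Spec_analyze_current_situation_py (observations : List String) (vulnerabilities : List (List (String × String))) (state : String) (out : String) : Prop := out = analyze_current_situation_py_alt observations vulnerabilities state
instance (observations : List String) (vulnerabilities : List (List (String × String))) (state : String) (out : String) : Decidable (Spec_analyze_current_situation_py observations vulnerabilities state out) := by unfold Spec_analyze_current_situation_py; infer_instance

-- ===== CLAIM =====
def Claim_equal_analyze_current_situation_py : Prop := ∀ (observations : List String) (vulnerabilities : List (List (String × String))) (state : String), Dom_analyze_current_situation_py observations vulnerabilities state → Spec_analyze_current_situation_py observations vulnerabilities state (analyze_current_situation_py observations vulnerabilities state)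

-- ===== LEMMAS AND PROOFS =====
theorem pvFoldl_flags (l : List String) (a b c d : Bool) :
    l.foldl pvStep (a, b, c, d) =
      ( a || l.any (fun obs => PySem.Str.isIn "DISCORD_CHANNEL_ACTIVE" obs || PySem.Str.isIn "SOCIAL_ENGINEERING_OPPORTUNITY" obs),
        b || l.any (fun obs => PySem.Str.isIn "VERIFICATION_NEEDED" obs || PySem.Str.isIn "VULN_DETECTED" obs),
        c || l.any (fun obs => PySem.Str.isIn "RE_KNOWLEDGE" obs),
        d || l.any (fun obs => PySem.Str.isIn "NETWORK_SUMMARY" obs) ) := by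
  induction l generalizing a b c d with
  | nil => simp
  | cons x xs ih =>
    simp only [List.foldl_cons, List.any_cons, pvStep]
    rw [ih]
    split_ifs <;> simp_all

-- ===== VERDICT =====
theorem analyze_current_situation_py_spec : Claim_equal_analyze_current_situation_py := by
  intro observations vulnerabilities state _
  unfold Spec_analyze_current_situation_py analyze_current_situation_py analyze_current_situation_py_alt
  rw [pvFoldl_flags]
  simp
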